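-- pv_equiv track=rewrite | github.com/karthik-skr/HackerRank-Python-Solution | magic-square-forming.py | getMagicGroups
-- ===== SOURCE A (Python) =====
-- def getMagicGroups(rowSum):
-- 	grps = []
-- 	for i in range(1,10):
-- 		for j in range(i+1,10):
-- 			for k in range(j+1,10):
-- 				if(sum([i,j,k]) == rowSum):
-- 					grps.append([i,j,k])
-- 	return grps
-- ===== SOURCE B (Python) =====
-- def getMagicGroups(rowSum):
--     return [
--         [i, j, rowSum - i - j]
--         for i in range(1, 10)
--         for j in range(max(i + 1, rowSum - i - 9), min(10, (rowSum - i - 1) // 2 + 1))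
--     ]
-- ===== Notes on version B (the rewrite author's own statement) =====
-- stated objective: alternative
-- what changed: B replaces A's three nested search loops with a single comprehension over (i, j) pairs whose j-range bounds are computed arithmetically (lower bound from k <= 9, upper bound from j < k via floor division), and the third element is the closed form rowSum - i - j, so no candidate triple is ever tested and discarded; both run in fixed constant time.
import Mathlib
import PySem

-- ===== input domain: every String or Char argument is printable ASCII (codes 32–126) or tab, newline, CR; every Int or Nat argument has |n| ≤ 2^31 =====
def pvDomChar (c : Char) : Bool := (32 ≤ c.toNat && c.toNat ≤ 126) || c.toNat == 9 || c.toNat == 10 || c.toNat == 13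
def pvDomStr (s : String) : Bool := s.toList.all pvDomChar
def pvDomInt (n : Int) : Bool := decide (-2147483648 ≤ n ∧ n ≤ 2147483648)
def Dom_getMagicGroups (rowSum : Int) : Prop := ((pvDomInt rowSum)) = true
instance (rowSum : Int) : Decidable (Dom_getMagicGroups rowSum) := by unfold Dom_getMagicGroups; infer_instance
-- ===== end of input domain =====

-- B replaces A's three nested search loops by one comprehension over (i, j) with arithmetically
-- computed j-range bounds and the closed-form third element rowSum - i - j (objective:
-- alternative decomposition; no candidate triple is tested and discarded).

-- ===== PORT A =====
def getMagicGroups (rowSum : Int) : List (List Int) :=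
  (PySem.List.pyRange 1 10 1).foldl (fun grps i =>
    (PySem.List.pyRange (i+1) 10 1).foldl (fun grps j =>
      (PySem.List.pyRange (j+1) 10 1).foldl (fun grps k =>
        if i + j + k = rowSum then grps ++ [[i, j, k]] else grps) grps) grps) []

-- ===== PORT B =====
def getMagicGroups_alt (rowSum : Int) : List (List Int) :=
  (PySem.List.pyRange 1 10 1).flatMap (fun i =>
    (PySem.List.pyRange (max (i + 1) (rowSum - i - 9))
        (min 10 (PySem.Int.floordiv (rowSum - i - 1) 2 + 1)) 1).map
      (fun j => [i, j, rowSum - i - j]))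

-- ===== PRECONDITION & SPEC =====
def Spec_getMagicGroups (rowSum : Int) (out : List (List Int)) : Prop := out = getMagicGroups_alt rowSum
instance (rowSum : Int) (out : List (List Int)) : Decidable (Spec_getMagicGroups rowSum out) := by unfold Spec_getMagicGroups; infer_instance

-- ===== CLAIM (what is proved, stated in full; the proofs are below) =====
def Claim_equal_getMagicGroups : Prop := ∀ (rowSum : Int), Dom_getMagicGroups rowSum → Spec_getMagicGroups rowSum (getMagicGroups rowSum)

-- ===== LEMMAS AND PROOFS =====

-- 'for x in l: if p(x): out.append(f(x))' as a flatMap of indicator singletons.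
theorem foldl_app_ite {α β : Type} (p : α → Prop) [DecidablePred p] (f : α → β) :
    ∀ (l : List α) (acc : List β),
      l.foldl (fun a x => if p x then a ++ [f x] else a) acc
        = acc ++ l.flatMap (fun x => if p x then [f x] else []) := by
  intro l
  induction l with
  | nil => intro acc; simp
  | cons a t ih =>
    intro acc
    by_cases h : p a <;> simp [h, ih]

-- foldl congruence on the traversed list's members.
theorem foldl_congr' {α β : Type} (l : List α) (f g : β → α → β) (init : β)
    (h : ∀ acc x, x ∈ l → f acc x = g acc x) : l.foldl f init = l.foldl g init := by
  induction l generalizing init with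
  | nil => rfl
  | cons a t ih => simp only [List.foldl_cons, h init a (by simp)]; exact ih _ (fun acc x hx => h acc x (by simp [hx]))

-- 'out.extend(g(x))' loop.
theorem foldl_app_flat {α β : Type} (g : α → List β) :
    ∀ (l : List α) (acc : List β),
      l.foldl (fun a x => a ++ g x) acc = acc ++ l.flatMap g := by
  intro l
  induction l with
  | nil => intro acc; simp
  | cons a t ih => intro acc; simp [ih]

theorem flatMap_single_nil {β : Type} (c : Int) (f : Int → β) (l : List Int) (hc : c ∉ l) :
    l.flatMap (fun x => if x = c then [f x] else []) = [] := by
  rw [List.flatMap_eq_nil_iff]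
  intro x hx
  rw [if_neg]
  rintro rfl
  exact hc hx

-- A nodup list contributes its unique match, if any.
theorem flatMap_single {β : Type} (c : Int) (f : Int → β) :
    ∀ (l : List Int), l.Nodup →
      l.flatMap (fun x => if x = c then [f x] else []) = if c ∈ l then [f c] else [] := by
  intro l
  induction l with
  | nil => intro _; simp
  | cons a t ih =>
    intro hn
    rw [List.nodup_cons] at hn
    by_cases h : a = c
    · subst h
      simp only [List.flatMap_cons, flatMap_single_nil a f t hn.1]
      simp
    · simp only [List.flatMap_cons, if_neg h, List.nil_append, ih hn.2, List.mem_cons]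
      by_cases hm : c ∈ t
      · simp [hm]
      · simp [hm]
        exact fun hh => h hh.symm

-- The whole inner k-loop of A equals the closed-form test for the pair (i, j).
theorem keyA (s i j : Int) :
    (PySem.List.pyRange (j+1) 10 1).flatMap
        (fun k => if i + j + k = s then ([[i, j, k]] : List (List Int)) else [])
      = if j < s - i - j ∧ s - i - j ≤ 9 then [[i, j, s - i - j]] else [] := by
  have hfun : (fun k => if i + j + k = s then ([[i, j, k]] : List (List Int)) else [])
      = (fun k => if k = s - i - j then [[i, j, k]] else []) := by
    funext k
    exact if_congr (by constructor <;> intro <;> omega) rfl rfl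
  rw [hfun, flatMap_single (s - i - j) (fun k => [i, j, k]) _ (PySem.List.nodup_pyRange_one _ _)]
  simp only [PySem.List.mem_pyRange_one]
  split_ifs <;> first | rfl | omega

-- A range filtered by an interval condition is the range of the intersected interval.
theorem filter_pyRange (lo hi : Int) :
    ∀ (n : Nat) (a b : Int), (b - a).toNat ≤ n →
      (PySem.List.pyRange a b 1).filter (fun j => decide (lo ≤ j ∧ j < hi))
        = PySem.List.pyRange (max a lo) (min b hi) 1 := by
  intro n
  induction n with
  | zero =>
    intro a b h
    rw [PySem.List.pyRange_one_eq_nil (by omega), PySem.List.pyRange_one_eq_nil (by omega)]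
    rfl
  | succ m ih =>
    intro a b h
    by_cases hab : b ≤ a
    · rw [PySem.List.pyRange_one_eq_nil hab, PySem.List.pyRange_one_eq_nil (by omega)]
      rfl
    · rw [not_le] at hab
      rw [PySem.List.pyRange_one_cons hab, List.filter_cons, ih (a+1) b (by omega)]
      by_cases hc : lo ≤ a ∧ a < hi
      · rw [if_pos (by exact decide_eq_true hc)]
        rw [PySem.List.pyRange_one_cons (a := max a lo) (by omega)]
        have h1 : max a lo = a := by omega
        have h2 : max (a+1) lo = max a lo + 1 := by omega
        rw [h1, h2, h1]
      · rw [if_neg (by simpa using hc)]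
        by_cases hlo : lo ≤ a
        · -- then a ≥ hi, both ranges empty
          rw [PySem.List.pyRange_one_eq_nil (by omega), PySem.List.pyRange_one_eq_nil (by omega)]
        · have : max (a+1) lo = max a lo := by omega
          rw [this]

-- Indicator flatMap is map-over-filter.
theorem flatMap_ite_filter {α β : Type} (p : α → Prop) [DecidablePred p] (f : α → β) (l : List α) :
    l.flatMap (fun x => if p x then [f x] else [])
      = (l.filter (fun x => decide (p x))).map f := by
  induction l with
  | nil => rfl
  | cons a t ih =>
    by_cases h : p a <;> simp [h, ih]

-- A's condition for the pair (i, j) is the interval condition B's range bounds encode.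
theorem cond_iff (s i j : Int) :
    (j < s - i - j ∧ s - i - j ≤ 9)
      ↔ (s - i - 9 ≤ j ∧ j < PySem.Int.floordiv (s - i - 1) 2 + 1) := by
  have h := PySem.Int.le_floordiv_iff_mul_le (a := s - i - 1) (b := 2) (q := j) (by omega)
  omega

theorem main_eq (s : Int) : getMagicGroups s = getMagicGroups_alt s := by
  unfold getMagicGroups getMagicGroups_alt
  rw [foldl_congr' _ _ (fun grps i =>
        grps ++ (PySem.List.pyRange (max (i + 1) (s - i - 9))
            (min 10 (PySem.Int.floordiv (s - i - 1) 2 + 1)) 1).map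
          (fun j => [i, j, s - i - j])) []
      (by
        intro acc i _
        rw [foldl_congr' _ _ (fun grps j =>
              grps ++ (if j < s - i - j ∧ s - i - j ≤ 9 then [[i, j, s - i - j]] else [])) acc
            (by
              intro acc2 j _
              rw [foldl_app_ite (fun k => i + j + k = s) (fun k => [i, j, k]) _ acc2, keyA s i j]),
            foldl_app_flat (fun j => if j < s - i - j ∧ s - i - j ≤ 9 then [[i, j, s - i - j]] else []),
            flatMap_ite_filter (fun j => j < s - i - j ∧ s - i - j ≤ 9) (fun j => [i, j, s - i - j])]
        have hp : (fun j => decide (j < s - i - j ∧ s - i - j ≤ 9))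
            = (fun j => decide (s - i - 9 ≤ j ∧ j < PySem.Int.floordiv (s - i - 1) 2 + 1)) := by
          funext j
          exact decide_eq_decide.mpr (cond_iff s i j)
        rw [hp, filter_pyRange _ _ (10 - (i+1)).toNat (i+1) 10 (le_refl _)]),
      foldl_app_flat]
  simp

-- ===== VERDICT (by name: the statement is the Claim_ definition above) =====
theorem getMagicGroups_spec : Claim_equal_getMagicGroups := by
  intro s _
  unfold Spec_getMagicGroups
  exact main_eq s
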